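-- pv_equiv track=rewrite | github.com/julianazacharias/code-signal-courses | fundamental-interview-preparation/02-loops/04-iterating-array-middle.py | solution
-- ===== SOURCE A (Python) =====
-- def solution(numbers):
--     mid_index = len(numbers) // 2
--
--     if len(numbers) % 2 != 0:
--         left_index = mid_index - 1
--         right_index = mid_index + 1
--         result = [numbers[mid_index]]
--     else:
--         left_index = mid_index -1
--         right_index = mid_index
--         result = []
--
--     while left_index >= 0 and right_index < len(numbers):
--         result.append(numbers[left_index] * numbers[right_index])
--         left_index -= 1
--         right_index += 1
--
--     return result
-- ===== SOURCE B (Python) =====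
-- def solution(numbers):
--     if len(numbers) <= 1:
--         return list(numbers)
--     return solution(numbers[1:-1]) + [numbers[0] * numbers[-1]]
-- ===== Notes on version B (the rewrite author's own statement) =====
-- stated objective: alternative
-- what changed: Replaces A's center-outward twin-index while loop with structural recursion that peels the outermost pair (first*last) off the list and appends it after the recursive result for the inner slice, building the answer back-to-front.
import Mathlib
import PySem

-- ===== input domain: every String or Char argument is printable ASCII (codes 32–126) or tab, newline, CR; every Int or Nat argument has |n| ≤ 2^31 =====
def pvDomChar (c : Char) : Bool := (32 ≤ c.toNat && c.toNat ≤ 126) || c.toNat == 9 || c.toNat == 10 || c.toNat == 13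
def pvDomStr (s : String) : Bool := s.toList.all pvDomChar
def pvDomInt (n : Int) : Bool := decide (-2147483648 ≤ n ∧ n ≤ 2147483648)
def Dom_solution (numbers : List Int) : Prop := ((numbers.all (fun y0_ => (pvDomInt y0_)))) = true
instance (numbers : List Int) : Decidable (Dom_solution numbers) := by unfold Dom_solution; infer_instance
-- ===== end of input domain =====

-- B replaces A's center-outward twin-index walk with structural recursion peeling the
-- outermost pair (first*last) and appending it after the recursion on the inner slice
-- (alternative decomposition; return value only).

-- ===== PORT A =====
-- the while loop of A: walk li down / ri up, appending products
def solutionLoop (numbers : List Int) (li ri : Int) (acc : List Int) : List Int :=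
  if li ≥ 0 ∧ ri < (numbers.length : Int) then
    solutionLoop numbers (li - 1) (ri + 1)
      (acc ++ [((PySem.List.pyGet? numbers li).getD 0) * ((PySem.List.pyGet? numbers ri).getD 0)])
  else acc
termination_by (li + 1).toNat
decreasing_by omega

def solution (numbers : List Int) : List Int :=
  let mid : Int := PySem.Int.floordiv numbers.length 2
  if PySem.Int.mod numbers.length 2 ≠ 0 then
    solutionLoop numbers (mid - 1) (mid + 1) [(PySem.List.pyGet? numbers mid).getD 0]
  else
    solutionLoop numbers (mid - 1) mid []

-- ===== PORT B =====
-- structural recursion of Source B: solution(xs) = solution(xs[1:-1]) + [xs[0]*xs[-1]]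
def solution_alt (numbers : List Int) : List Int :=
  if h : numbers.length ≤ 1 then numbers
  else solution_alt (PySem.List.slice numbers (some 1) (some (-1))) ++
    [((PySem.List.pyGet? numbers 0).getD 0) * ((PySem.List.pyGet? numbers (-1)).getD 0)]
termination_by numbers.length
decreasing_by
  simp only [PySem.List.length_slice]
  rcases numbers with _ | ⟨x, xs⟩
  · simp at h
  · simp [PySem.List.clampIdx] at h ⊢
    split_ifs <;> omega

-- ===== PRECONDITION & SPEC =====
def Spec_solution (numbers : List Int) (out : List Int) : Prop := out = solution_alt numbers
instance (numbers : List Int) (out : List Int) : Decidable (Spec_solution numbers out) := by unfold Spec_solution; infer_instance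

-- ===== CLAIM (what is proved, stated in full; the proofs are below) =====
def Claim_equal_solution : Prop := ∀ (numbers : List Int), Dom_solution numbers → Spec_solution numbers (solution numbers)

-- ===== LEMMAS AND PROOFS =====

-- canonical form shared by both programs: optional middle element, then products of
-- the reversed left half zipped with the right half
def Rform (xs : List Int) : List Int :=
  (xs.drop (xs.length / 2)).take (xs.length % 2) ++
    (((xs.take (xs.length / 2)).reverse.zip (xs.drop ((xs.length + 1) / 2))).map
      (fun p => p.1 * p.2))

lemma loop_eq (numbers : List Int) (li ri : Int) (acc : List Int)
    (hinv : li + ri = (numbers.length : Int) - 1) (hri : 0 ≤ ri) :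
    solutionLoop numbers li ri acc =
      acc ++ (((numbers.take (li + 1).toNat).reverse.zip (numbers.drop ri.toNat)).map
        (fun p => p.1 * p.2)) := by
  fun_induction solutionLoop numbers li ri acc with
  | case1 li ri acc h ih =>
      obtain ⟨hli, hriU⟩ := h
      have hk : li.toNat < numbers.length := by omega
      have hr : ri.toNat < numbers.length := by omega
      rw [ih (by omega) (by omega)]
      have h0 : (li - 1 + 1).toNat = li.toNat := by omega
      have h1 : (li + 1).toNat = li.toNat + 1 := by omega
      have h2 : (ri + 1).toNat = ri.toNat + 1 := by omega
      have gli : PySem.List.pyGet? numbers li = some (numbers[li.toNat]) :=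
        PySem.List.pyGet?_eq_some_getElem numbers (i := li) (by omega) (by omega)
      have gri : PySem.List.pyGet? numbers ri = some (numbers[ri.toNat]) :=
        PySem.List.pyGet?_eq_some_getElem numbers (i := ri) (by omega) (by omega)
      rw [h0, h1, h2, gli, gri, List.take_add_one, List.getElem?_eq_getElem hk,
          List.drop_eq_getElem_cons hr]
      simp only [Option.getD_some, Option.toList_some, List.reverse_append,
        List.reverse_singleton, List.zip_cons_cons,
        List.map_cons, List.append_assoc, List.cons_append, List.nil_append]
  | case2 li ri acc h =>
      have hli : li < 0 := by omega
      have : (li + 1).toNat = 0 := by omega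
      simp [this]

lemma solution_eq_Rform (numbers : List Int) : solution numbers = Rform numbers := by
  have hmod : PySem.Int.mod (numbers.length : Int) 2 = ((numbers.length % 2 : Nat) : Int) := by
    simp [PySem.Int.mod, Int.fmod_eq_emod]
  have hdiv : PySem.Int.floordiv (numbers.length : Int) 2 = ((numbers.length / 2 : Nat) : Int) := by
    simp [PySem.Int.floordiv, Int.fdiv_eq_ediv]
  simp only [solution, Rform, hdiv, hmod]
  set k := numbers.length / 2 with hk
  by_cases hpar : numbers.length % 2 = 0
  · rw [if_neg (by omega)]
    rw [loop_eq numbers ((k : Int) - 1) (k : Int) [] (by omega) (by positivity)]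
    have e1 : ((k : Int) - 1 + 1).toNat = k := by omega
    have e2 : (numbers.length + 1) / 2 = k := by omega
    rw [e1, Int.toNat_natCast, e2, hpar]
    simp
  · rw [if_pos (by omega)]
    rw [loop_eq numbers ((k : Int) - 1) ((k : Int) + 1)
      [(PySem.List.pyGet? numbers (k : Int)).getD 0] (by omega) (by positivity)]
    have e1 : ((k : Int) - 1 + 1).toNat = k := by omega
    have e2 : ((k : Int) + 1).toNat = k + 1 := by omega
    have e3 : (numbers.length + 1) / 2 = k + 1 := by omega
    have e4 : numbers.length % 2 = 1 := by omega
    have hkl : k < numbers.length := by omega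
    have g : PySem.List.pyGet? numbers (k : Int) = some (numbers[k]) :=
      PySem.List.pyGet?_eq_some_getElem numbers (i := (k : Int)) (by omega) (by omega)
    rw [e1, e2, e3, e4, g]
    have htk : (numbers.drop k).take 1 = [numbers[k]] := by
      simp [List.take_one, List.head?_drop, List.getElem?_eq_getElem hkl]
    rw [htk]
    simp

-- unfolding the inner slice xs[1:-1] on an explicitly decomposed list
lemma slice_one_neg_one (a b : Int) (ys : List Int) :
    PySem.List.slice (a :: (ys ++ [b])) (some 1) (some (-1)) = ys := by
  simp [PySem.List.slice]

lemma Rform_step (a b : Int) (ys : List Int) :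
    Rform (a :: (ys ++ [b])) = Rform ys ++ [a * b] := by
  set n := ys.length with hn
  have hlen : (a :: (ys ++ [b])).length = n + 2 := by simp [hn]
  have hd2 : (n + 2) / 2 = n / 2 + 1 := by omega
  have hm2 : (n + 2) % 2 = n % 2 := by omega
  have hd3 : (n + 2 + 1) / 2 = (n + 1) / 2 + 1 := by omega
  simp only [Rform, hlen, hd2, hm2, hd3]
  -- take / drop computations
  have htake : (a :: (ys ++ [b])).take (n / 2 + 1) = a :: ys.take (n / 2) := by
    rw [List.take_succ_cons, List.take_append_of_le_length (by omega)]
  have hdropz : (a :: (ys ++ [b])).drop ((n + 1) / 2 + 1) = ys.drop ((n + 1) / 2) ++ [b] := by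
    rw [List.drop_succ_cons, List.drop_append_of_le_length (by omega)]
  have hdropm : (a :: (ys ++ [b])).drop (n / 2 + 1) = ys.drop (n / 2) ++ [b] := by
    rw [List.drop_succ_cons, List.drop_append_of_le_length (by omega)]
  rw [htake, hdropz, hdropm]
  have hzip : (a :: ys.take (n / 2)).reverse.zip (ys.drop ((n + 1) / 2) ++ [b]) =
      ((ys.take (n / 2)).reverse.zip (ys.drop ((n + 1) / 2))) ++ [(a, b)] := by
    rw [List.reverse_cons]
    exact List.zip_append (by simp; omega)
  have hmid : (ys.drop (n / 2) ++ [b]).take (n % 2) =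
      (ys.drop (n / 2)).take (n % 2) := by
    rcases Nat.eq_zero_or_pos n with h0 | hpos
    · simp [h0]
    · rw [List.take_append_of_le_length (by simp; omega)]
  rw [hzip, hmid]
  simp [hn]

lemma alt_eq_Rform : ∀ (m : Nat) (xs : List Int), xs.length ≤ m → solution_alt xs = Rform xs := by
  intro m
  induction m with
  | zero =>
      intro xs h
      have : xs = [] := List.eq_nil_of_length_eq_zero (by omega)
      subst this
      rw [solution_alt.eq_def]
      simp [Rform]
  | succ m ih =>
      intro xs h
      by_cases hs : xs.length ≤ 1
      · rw [solution_alt.eq_def, dif_pos hs]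
        match xs, hs with
        | [], _ => simp [Rform]
        | [x], _ => simp [Rform]
      · -- decompose xs = a :: ys ++ [b]
        have hne : xs ≠ [] := by intro h0; rw [h0] at hs; simp at hs
        obtain ⟨a, t, rfl⟩ := List.exists_cons_of_ne_nil hne
        have hte : t ≠ [] := by intro h0; rw [h0] at hs; simp at hs
        obtain ⟨ys, b, rfl⟩ := (List.eq_nil_or_concat t).resolve_left hte
        simp only [List.concat_eq_append] at hs h ⊢
        rw [solution_alt.eq_def, dif_neg hs, slice_one_neg_one]
        have hget0 : (PySem.List.pyGet? (a :: (ys ++ [b])) 0).getD 0 = a := by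
          rw [PySem.List.pyGet?_zero]
          simp
        have hgetl : (PySem.List.pyGet? (a :: (ys ++ [b])) (-1)).getD 0 = b := by
          rw [PySem.List.pyGet?_neg_one, ← List.cons_append, List.getLast?_concat]
          rfl
        rw [hget0, hgetl, ih ys (by simp at h ⊢; omega), Rform_step]

-- ===== VERDICT (by name: the statement is the Claim_ definition above) =====
theorem solution_spec : Claim_equal_solution := by
  intro numbers _
  unfold Spec_solution
  rw [solution_eq_Rform, alt_eq_Rform numbers.length numbers le_rfl]
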